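-- pv_equiv track=rewrite | github.com/ilia-rassolov/Hexlet-local | 04.abstraction/k_online_store.py | remove_product
-- ===== SOURCE A (Python) =====
-- def remove_product(catalog, num_product):
--     for num_catalog, product in catalog.items():
--         if product['id'] == num_product:
--             catalog.pop(num_catalog)
--             break
--     catalog_new = dict()
--     for num_catalog_new, product in enumerate(catalog.values(), 1):
--         catalog_new[num_catalog_new] = product
--     return catalog_new
-- ===== SOURCE B (Python) =====
-- def remove_product(catalog, num_product):
--     # Single fused pass: remove the first product whose id matches and renumber
--     # the remaining products 1.. in the same traversal (A does two passes).
--     # Like A, it mutates `catalog` by popping the removed key.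
--     catalog_new = {}
--     i = 0
--     removed = False
--     for key, product in list(catalog.items()):
--         if not removed and product['id'] == num_product:
--             catalog.pop(key)
--             removed = True
--             continue
--         i += 1
--         catalog_new[i] = product
--     return catalog_new
-- ===== Notes on version B (the rewrite author's own statement) =====
-- stated objective: alternative
-- what changed: B fuses A's two sequential passes (find-and-pop, then renumber via enumerate) into one traversal with a removed-flag and a running counter that builds the renumbered dict directly; Pre_ excludes association lists with duplicate keys (they do not represent Python dicts) and inputs where a product scanned before the first match lacks an 'id' key, on which A raises KeyError (B raises there too).
import Mathlib
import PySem

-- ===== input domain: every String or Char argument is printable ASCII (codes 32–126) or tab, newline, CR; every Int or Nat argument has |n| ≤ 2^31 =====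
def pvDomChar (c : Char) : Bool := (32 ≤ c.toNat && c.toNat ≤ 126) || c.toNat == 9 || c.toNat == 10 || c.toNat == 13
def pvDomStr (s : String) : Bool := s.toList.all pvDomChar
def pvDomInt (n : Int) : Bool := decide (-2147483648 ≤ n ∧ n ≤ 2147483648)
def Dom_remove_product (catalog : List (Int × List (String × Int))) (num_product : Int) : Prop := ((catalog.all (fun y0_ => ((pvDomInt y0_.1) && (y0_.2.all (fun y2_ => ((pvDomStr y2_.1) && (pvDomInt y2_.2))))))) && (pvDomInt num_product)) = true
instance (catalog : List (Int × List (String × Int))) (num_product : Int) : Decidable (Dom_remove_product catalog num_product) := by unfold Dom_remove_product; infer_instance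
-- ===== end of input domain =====

-- B fuses A's two passes (find-and-pop, then renumber) into a single traversal; return-value
-- equivalence only: both Pythons also pop the removed key from `catalog` in place (same mutation).

-- shared guard: `product['id'] == num_product`; `get? = none` is Python's KeyError, excluded by Pre_
def pvIdMatch (p : List (String × Int)) (num_product : Int) : Bool :=
  match PySem.Dict.get? (PySem.Dict.mk p) "id" with
  | some v => v == num_product
  | none => false

-- ===== PORT A =====
-- first loop of A: walk the items; on the first match pop that key from the dict and break
def pvPopLoopA (items : List (Int × List (String × Int)))
    (d : PySem.Dict Int (List (String × Int))) (num_product : Int) :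
    PySem.Dict Int (List (String × Int)) :=
  match items with
  | [] => d
  | (k, p) :: rest =>
    if pvIdMatch p num_product then PySem.Dict.erase d k
    else pvPopLoopA rest d num_product

-- second loop of A: `for n, product in enumerate(catalog.values(), 1): catalog_new[n] = product`
def pvRenumA (vals : List (List (String × Int))) : PySem.Dict Int (List (String × Int)) :=
  (vals.foldl
    (fun (st : Int × PySem.Dict Int (List (String × Int))) p =>
      (st.1 + 1, st.2.insert st.1 p))
    (1, PySem.Dict.empty)).2

def remove_product (catalog : List (Int × List (String × Int))) (num_product : Int) :
    List (Int × List (String × Int)) :=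
  -- d = the input dict; first loop pops the matched key, second loop renumbers its values
  (pvRenumA (pvPopLoopA (PySem.Dict.mk catalog).items (PySem.Dict.mk catalog) num_product).values).items

-- ===== PORT B =====
-- B's single fused loop: state = (removed flag, counter, catalog_new)
def pvGoB (items : List (Int × List (String × Int))) (num_product : Int)
    (removed : Bool) (i : Int) (catalog_new : PySem.Dict Int (List (String × Int))) :
    PySem.Dict Int (List (String × Int)) :=
  match items with
  | [] => catalog_new
  | (_, p) :: rest =>
    if !removed && pvIdMatch p num_product then
      pvGoB rest num_product true i catalog_new
    else
      pvGoB rest num_product removed (i + 1) (catalog_new.insert (i + 1) p)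

def remove_product_alt (catalog : List (Int × List (String × Int))) (num_product : Int) :
    List (Int × List (String × Int)) :=
  (pvGoB catalog num_product false 0 PySem.Dict.empty).items

-- ===== PRECONDITION & SPEC =====
-- Pre_ excludes association lists with duplicate keys (catalog or a product), which do not
-- represent Python dicts, and inputs where some product scanned before the first id-match
-- lacks an "id" key — there Python's `product['id']` raises KeyError (in both A and B).
def Pre_remove_product (catalog : List (Int × List (String × Int))) (num_product : Int) : Prop :=
  (catalog.map (·.1)).Nodup ∧
  (∀ p ∈ catalog, (p.2.map (·.1)).Nodup) ∧
  (∀ i : Fin catalog.length, PySem.Dict.get? (PySem.Dict.mk (catalog.get i).2) "id" = none →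
    ∃ j : Fin catalog.length, j < i ∧ pvIdMatch (catalog.get j).2 num_product = true)
instance (catalog : List (Int × List (String × Int))) (num_product : Int) :
    Decidable (Pre_remove_product catalog num_product) := by
  unfold Pre_remove_product; infer_instance

def pvWitness_remove_product : (List (Int × List (String × Int))) × Int :=
  ([(1, [("id", 5), ("price", 30)]), (2, [("id", 7)])], 5)

def Spec_remove_product (catalog : List (Int × List (String × Int))) (num_product : Int) (out : List (Int × List (String × Int))) : Prop := out = remove_product_alt catalog num_product
instance (catalog : List (Int × List (String × Int))) (num_product : Int) (out : List (Int × List (String × Int))) : Decidable (Spec_remove_product catalog num_product out) := by unfold Spec_remove_product; infer_instance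

-- ===== CLAIM (what is proved, stated in full; the proofs are below) =====
def Claim_equal_remove_product : Prop := ∀ (catalog : List (Int × List (String × Int))) (num_product : Int), Dom_remove_product catalog num_product → Pre_remove_product catalog num_product → Spec_remove_product catalog num_product (remove_product catalog num_product)

-- ===== LEMMAS AND PROOFS =====

-- what A's first loop removes, as a structural recursion (proof-only helper)
def pvRemFirst (catalog : List (Int × List (String × Int))) (num_product : Int) :
    List (Int × List (String × Int)) :=
  match catalog with
  | [] => []
  | (k, p) :: rest =>
    if pvIdMatch p num_product then rest
    else (k, p) :: pvRemFirst rest num_product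

-- A's first loop, generalized over a processed prefix: with distinct keys, popping the
-- matched key from the whole dict removes exactly the first matching item.
theorem pvPopLoopA_eq (num_product : Int) :
    ∀ (rest pre : List (Int × List (String × Int))),
      ((pre ++ rest).map (·.1)).Nodup →
      pvPopLoopA rest (PySem.Dict.mk (pre ++ rest)) num_product =
        PySem.Dict.mk (pre ++ pvRemFirst rest num_product) := by
  intro rest
  induction rest with
  | nil => intro pre _; simp [pvPopLoopA, pvRemFirst]
  | cons hd tl ih =>
    intro pre hnd
    obtain ⟨k, p⟩ := hd
    by_cases hm : pvIdMatch p num_product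
    · simp only [pvPopLoopA, pvRemFirst, hm, if_pos]
      -- erase filters out all items with key k; nodup keys ⇒ only this one
      have hk : ∀ q ∈ pre ++ tl, ¬ (q.1 = k) := by
        have hnd' : (pre.map (·.1) ++ (k :: tl.map (·.1))).Nodup := by simpa using hnd
        have hdisj := List.nodup_append.mp hnd'
        have hkpre : k ∉ pre.map (·.1) := fun h => hdisj.2.2 k h k List.mem_cons_self rfl
        have hktl : k ∉ tl.map (·.1) := (List.nodup_cons.mp hdisj.2.1).1
        intro q hq hqk
        rcases List.mem_append.mp hq with h | h
        · exact hkpre (hqk ▸ List.mem_map_of_mem h)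
        · exact hktl (hqk ▸ List.mem_map_of_mem h)
      have : (pre ++ (k, p) :: tl).filter (fun q => !q.1 == k) = pre ++ tl := by
        rw [List.filter_append, List.filter_cons]
        simp only [beq_self_eq_true, Bool.not_true, Bool.false_eq_true, if_neg,
          Bool.false_eq_true, not_false_eq_true]
        have h1 : pre.filter (fun q => !q.1 == k) = pre :=
          List.filter_eq_self.mpr (fun q hq => by
            simp only [Bool.not_eq_eq_eq_not] at *
            simpa using hk q (List.mem_append.mpr (Or.inl hq)))
        have h2 : tl.filter (fun q => !q.1 == k) = tl :=
          List.filter_eq_self.mpr (fun q hq => by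
            simp only [Bool.not_eq_eq_eq_not] at *
            simpa using hk q (List.mem_append.mpr (Or.inr hq)))
        simp [h1, h2]
      simp [PySem.Dict.erase, this]
    · simp only [pvPopLoopA, pvRemFirst, hm, if_neg, Bool.false_eq_true, not_false_eq_true]
      have := ih (pre ++ [(k, p)]) (by simpa using hnd)
      simpa using this
  
-- the common renumbering fold
def pvRenumStep (st : Int × PySem.Dict Int (List (String × Int))) (p : List (String × Int)) :
    Int × PySem.Dict Int (List (String × Int)) :=
  (st.1 + 1, st.2.insert st.1 p)

theorem pvRenumA_eq_foldl (vals : List (List (String × Int))) :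
    pvRenumA vals = (vals.foldl pvRenumStep (1, PySem.Dict.empty)).2 := by
  rfl

-- B's loop after the removal happened is exactly the renumbering fold
theorem pvGoB_true (num_product : Int) :
    ∀ (rest : List (Int × List (String × Int))) (i : Int)
      (acc : PySem.Dict Int (List (String × Int))),
      pvGoB rest num_product true i acc = ((rest.map (·.2)).foldl pvRenumStep (i + 1, acc)).2 := by
  intro rest
  induction rest with
  | nil => intro i acc; rfl
  | cons hd tl ih =>
    intro i acc
    obtain ⟨k, p⟩ := hd
    simp only [pvGoB, Bool.not_true, Bool.false_and, Bool.false_eq_true, if_neg,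
      not_false_eq_true, List.map_cons, List.foldl_cons]
    exact ih (i + 1) (acc.insert (i + 1) p)

-- B's loop before the removal equals the renumbering fold over pvRemFirst
theorem pvGoB_false (num_product : Int) :
    ∀ (items : List (Int × List (String × Int))) (i : Int)
      (acc : PySem.Dict Int (List (String × Int))),
      pvGoB items num_product false i acc =
        (((pvRemFirst items num_product).map (·.2)).foldl pvRenumStep (i + 1, acc)).2 := by
  intro items
  induction items with
  | nil => intro i acc; rfl
  | cons hd tl ih =>
    intro i acc
    obtain ⟨k, p⟩ := hd
    by_cases hm : pvIdMatch p num_product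
    · simp only [pvGoB, pvRemFirst, hm, Bool.not_false, Bool.true_and, if_pos]
      exact pvGoB_true num_product tl i acc
    · simp only [pvGoB, pvRemFirst, hm, Bool.not_false, Bool.true_and, Bool.false_eq_true,
        if_neg, not_false_eq_true, List.map_cons, List.foldl_cons]
      exact ih (i + 1) (acc.insert (i + 1) p)

-- ===== VERDICT (by name: the statement is the Claim_ definition above) =====
theorem remove_product_spec : Claim_equal_remove_product := by
  intro catalog num_product _ hpre
  unfold Spec_remove_product remove_product remove_product_alt
  have hpop := pvPopLoopA_eq num_product catalog [] (by simpa using hpre.1)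
  simp only [List.nil_append] at hpop
  have hitems : (PySem.Dict.mk catalog).items = catalog := rfl
  rw [hitems, hpop, pvGoB_false]
  have hvals : (PySem.Dict.mk (pvRemFirst catalog num_product)).values
      = (pvRemFirst catalog num_product).map (·.2) := rfl
  rw [hvals, pvRenumA_eq_foldl]
  norm_num
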